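-- pv_equiv track=rewrite | github.com/nayoungkim94/nayoungkim94.github.io | Untitled-1.py | find_keyword
-- ===== SOURCE A (Python) =====
-- def find_keyword(keywords, document):
--     result = []
--
--     for keyword in keywords:
--         start = 0
--
--         while True:
--             start = document.find(keyword, start)
--             if start == -1:
--                 break
--
--             result.append(keyword)
--             start += 1
--
--     return result
-- ===== SOURCE B (Python) =====
-- def find_keyword(keywords, document):
--     n = len(document)
--     result = []
--     for keyword in keywords:
--         count = sum(1 for i in range(n + 1) if document.startswith(keyword, i))
--         result += [keyword] * count
--     return result
-- ===== Notes on version B (the rewrite author's own statement) =====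
-- stated objective: simpler
-- what changed: Replaces the restarting str.find while-loop with a per-keyword count of start positions where document.startswith(keyword, i), then replicates the keyword that many times.
import Mathlib
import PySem

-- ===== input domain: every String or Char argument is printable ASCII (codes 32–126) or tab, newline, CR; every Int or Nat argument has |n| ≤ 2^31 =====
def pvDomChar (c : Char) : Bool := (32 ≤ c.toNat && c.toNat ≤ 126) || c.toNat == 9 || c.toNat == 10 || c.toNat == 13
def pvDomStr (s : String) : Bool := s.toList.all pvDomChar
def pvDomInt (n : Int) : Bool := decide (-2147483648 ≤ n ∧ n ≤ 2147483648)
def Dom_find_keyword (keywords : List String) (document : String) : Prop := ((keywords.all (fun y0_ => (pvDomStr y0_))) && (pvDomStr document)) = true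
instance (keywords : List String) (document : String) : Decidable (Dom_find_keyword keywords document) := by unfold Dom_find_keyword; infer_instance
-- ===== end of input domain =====

-- B replaces A's restarting str.find loop by counting the start positions at which the
-- document starts with the keyword and replicating the keyword that many times (objective: simpler).

-- ===== PORT A =====
-- str.find(sub, start) is PySem.Chars.findFrom.  The two lemmas below are cited by the
-- port's decreasing_by (termination of A's while-loop): a found index lies in [start, len].
theorem pvFindFrom_past (s sub : List Char) (k : Nat) (h : s.length < k) :
    PySem.Chars.findFrom s sub (k : Int) none = -1 := by
  simp [PySem.Chars.findFrom]
  omega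

theorem pvFindFrom_bounds (s sub : List Char) (k : Nat)
    (h : PySem.Chars.findFrom s sub (k : Int) none ≠ -1) :
    k ≤ (PySem.Chars.findFrom s sub (k : Int) none).toNat ∧
      (PySem.Chars.findFrom s sub (k : Int) none).toNat ≤ s.length := by
  by_cases hk : k ≤ s.length
  · obtain ⟨h1, h2, h3⟩ := PySem.Chars.findFrom_natCast_spec s sub k hk h
    refine ⟨by omega, ?_⟩
    by_cases hs : sub = []
    · subst hs
      by_contra hgt
      exact h3 k le_rfl (by omega) List.nil_prefix
    · by_contra hgt
      have hnil : s.drop (PySem.Chars.findFrom s sub (k : Int) none).toNat = [] :=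
        List.drop_eq_nil_of_le (by omega)
      rw [hnil] at h2
      exact hs (List.prefix_nil.mp h2)
  · exact absurd (pvFindFrom_past s sub k (by omega)) h

-- A's inner while-loop: find the keyword from `start`; on a hit append the keyword and
-- restart the search at the hit position + 1.
def loopA (s : List Char) (kw : String) (start : Nat) : List String :=
  let r := PySem.Chars.findFrom s kw.toList (start : Int) none
  if hr : r = -1 then []
  else kw :: loopA s kw (r.toNat + 1)
termination_by s.length + 1 - start
decreasing_by
  have := pvFindFrom_bounds s kw.toList start hr
  omega

def find_keyword (keywords : List String) (document : String) : List String :=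
  keywords.foldl (fun result keyword => result ++ loopA document.toList keyword 0) []

-- ===== PORT B =====
-- sum(1 for i in range(n+1) if document.startswith(keyword, i)); document.startswith(p, i)
-- with 0 ≤ i is exactly PySem.Chars.startswith on document[i:].
def countB (s : List Char) (kw : String) : Nat :=
  (List.range (s.length + 1)).countP (fun i => PySem.Chars.startswith (s.drop i) kw.toList)

def find_keyword_alt (keywords : List String) (document : String) : List String :=
  keywords.foldl (fun result keyword =>
    result ++ List.replicate (countB document.toList keyword) keyword) []

-- ===== PRECONDITION & SPEC =====
def Spec_find_keyword (keywords : List String) (document : String) (out : List String) : Prop := out = find_keyword_alt keywords document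
instance (keywords : List String) (document : String) (out : List String) : Decidable (Spec_find_keyword keywords document out) := by unfold Spec_find_keyword; infer_instance

-- ===== CLAIM (what is proved, stated in full; the proofs are below) =====
def Claim_equal_find_keyword : Prop := ∀ (keywords : List String) (document : String), Dom_find_keyword keywords document → Spec_find_keyword keywords document (find_keyword keywords document)

-- ===== LEMMAS AND PROOFS =====

-- counting over [a, len] equals counting over [b, len] when no position in [a, b) matches
theorem count_skip (s sub : List Char) (a b : Nat) (hab : a ≤ b) (hb : b ≤ s.length + 1)
    (hno : ∀ i, a ≤ i → i < b → ¬ sub <+: s.drop i) :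
    (List.range' a (s.length + 1 - a)).countP (fun i => PySem.Chars.startswith (s.drop i) sub) =
    (List.range' b (s.length + 1 - b)).countP (fun i => PySem.Chars.startswith (s.drop i) sub) := by
  induction b, hab using Nat.le_induction with
  | base => rfl
  | succ b hb' ih =>
    have hbl : b ≤ s.length := by omega
    have hsplit : s.length + 1 - b = (s.length + 1 - (b + 1)) + 1 := by omega
    rw [ih (by omega) (fun i h1 h2 => hno i h1 (by omega)), hsplit, List.range'_succ,
      List.countP_cons]
    have : PySem.Chars.startswith (s.drop b) sub = false := by
      simp only [PySem.Chars.startswith]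
      rw [Bool.eq_false_iff]
      intro hpre
      exact hno b hb' (by omega) (List.isPrefixOf_iff_prefix.mp hpre)
    simp [this]

theorem loopA_eq (s : List Char) (kw : String) :
    ∀ (n start : Nat), s.length + 1 - start ≤ n →
    loopA s kw start = List.replicate
      ((List.range' start (s.length + 1 - start)).countP
        (fun i => PySem.Chars.startswith (s.drop i) kw.toList)) kw := by
  intro n
  induction n with
  | zero =>
    intro start hle
    have hgt : s.length < start := by omega
    rw [loopA]
    simp only [pvFindFrom_past s kw.toList start hgt, dif_pos]
    have : s.length + 1 - start = 0 := by omega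
    rw [this]
    rfl
  | succ n ih =>
    intro start hle
    by_cases hgt : s.length < start
    · rw [loopA]
      simp only [pvFindFrom_past s kw.toList start hgt, dif_pos]
      have : s.length + 1 - start = 0 := by omega
      rw [this]
      rfl
    · have hk : start ≤ s.length := by omega
      by_cases hr : PySem.Chars.findFrom s kw.toList (start : Int) none = -1
      · rw [loopA]
        simp only [dif_pos hr]
        have hninf : ¬ kw.toList <:+: s.drop start :=
          (PySem.Chars.findFrom_natCast_eq_neg_one_iff s kw.toList start hk).mp hr
        have hno : ∀ i, start ≤ i → i < s.length + 1 → ¬ kw.toList <+: s.drop i := by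
          intro i h1 _ hpre
          apply hninf
          obtain ⟨t, ht⟩ := hpre
          refine ⟨(s.drop start).take (i - start), t, ?_⟩
          have hdd : (s.drop start).drop (i - start) = s.drop i := by
            rw [List.drop_drop]
            congr 1
            omega
          rw [List.append_assoc, ht, ← hdd, List.take_append_drop]
        rw [count_skip s kw.toList start (s.length + 1) (by omega) le_rfl hno]
        simp
      · obtain ⟨hb1, hb2⟩ := pvFindFrom_bounds s kw.toList start hr
        obtain ⟨hge, hpre, hmin⟩ := PySem.Chars.findFrom_natCast_spec s kw.toList start hk hr
        set j := (PySem.Chars.findFrom s kw.toList (start : Int) none).toNat with hj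
        rw [loopA]
        simp only [dif_neg hr]
        rw [ih (j + 1) (by omega)]
        rw [count_skip s kw.toList start j hb1 (by omega) hmin]
        have hsplit : s.length + 1 - j = (s.length + 1 - (j + 1)) + 1 := by omega
        have hP : PySem.Chars.startswith (s.drop j) kw.toList = true := by
          simp only [PySem.Chars.startswith]
          exact List.isPrefixOf_iff_prefix.mpr hpre
        rw [hsplit, List.range'_succ]
        simp only [List.countP_cons, hP, if_true]
        rw [List.replicate_succ]

theorem loopA_zero_eq (s : List Char) (kw : String) :
    loopA s kw 0 = List.replicate (countB s kw) kw := by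
  rw [loopA_eq s kw (s.length + 1) 0 (by omega)]
  simp [countB, List.range_eq_range']

-- ===== VERDICT (by name: the statement is the Claim_ definition above) =====
theorem find_keyword_spec : Claim_equal_find_keyword := by
  intro keywords document _
  show find_keyword keywords document = find_keyword_alt keywords document
  unfold find_keyword find_keyword_alt
  congr 1
  funext result keyword
  rw [loopA_zero_eq]
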